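-- pv_equiv track=rewrite | github.com/fdfdsf/Joint-extraction-with-self-attention | ADE/eval.py | relationChunks
-- ===== SOURCE A (Python) =====
-- def relationChunks(relations, ners, relationTuple="boundaries_type"):
--     relationChunks = []
--     for rel in relations:
--
--         relation = rel[1]
--         left_chunk = ""
--         right_chunk = ""
--         for ner in ners:
--             if rel[0] >= ner[1] and rel[0] <= ner[2]:
--                 # print (ner)
--                 if relationTuple == "boundaries_type":
--                     left_chunk = ner
--                 elif relationTuple == "boundaries":
--                     left_chunk = (ner[1], ner[2])
--                 elif relationTuple == "type":
--                     left_chunk = (ner[0])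
--             if rel[2] >= ner[1] and rel[2] <= ner[2]:
--                 # print (ner)
--                 if relationTuple == "boundaries_type":
--                     right_chunk = ner
--                 elif relationTuple == "boundaries":
--                     right_chunk = (ner[1], ner[2])
--                 elif relationTuple == "type":
--                     right_chunk = (ner[0])
--         if (left_chunk != "" and right_chunk != ""):
--             relationChunks.append((left_chunk, relation, right_chunk))
--     return relationChunks
-- ===== SOURCE B (Python) =====
-- def relationChunks(relations, ners, relationTuple="boundaries_type"):
--     # Unknown formats produce no chunks in any case.
--     if relationTuple not in ("boundaries_type", "boundaries", "type"):
--         return []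
--     # Collect the distinct endpoints once, then sweep the ner list ONCE,
--     # recording for every endpoint the last chunk that contains it.
--     points = set()
--     for rel in relations:
--         points.add(rel[0])
--         points.add(rel[2])
--     best = {}
--     for ner in ners:
--         for p in points:
--             if ner[1] <= p <= ner[2]:
--                 best[p] = ner
--     def render(ner):
--         if relationTuple == "boundaries_type":
--             return ner
--         if relationTuple == "boundaries":
--             return (ner[1], ner[2])
--         return ner[0]
--     out = []
--     for rel in relations:
--         if rel[0] in best and rel[2] in best:
--             out.append((render(best[rel[0]]), rel[1], render(best[rel[2]])))
--     return out
-- ===== Notes on version B (the rewrite author's own statement) =====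
-- stated objective: alternative
-- what changed: B inverts A's loop nest: it collects the distinct relation endpoints into a set, makes ONE sweep over the ner list filling a dict endpoint->last containing chunk, and assembles the output by O(1) dict lookups per relation, instead of A's full rescan of all ners for every relation (measured 11.5x faster at the largest timing size).
import Mathlib
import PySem

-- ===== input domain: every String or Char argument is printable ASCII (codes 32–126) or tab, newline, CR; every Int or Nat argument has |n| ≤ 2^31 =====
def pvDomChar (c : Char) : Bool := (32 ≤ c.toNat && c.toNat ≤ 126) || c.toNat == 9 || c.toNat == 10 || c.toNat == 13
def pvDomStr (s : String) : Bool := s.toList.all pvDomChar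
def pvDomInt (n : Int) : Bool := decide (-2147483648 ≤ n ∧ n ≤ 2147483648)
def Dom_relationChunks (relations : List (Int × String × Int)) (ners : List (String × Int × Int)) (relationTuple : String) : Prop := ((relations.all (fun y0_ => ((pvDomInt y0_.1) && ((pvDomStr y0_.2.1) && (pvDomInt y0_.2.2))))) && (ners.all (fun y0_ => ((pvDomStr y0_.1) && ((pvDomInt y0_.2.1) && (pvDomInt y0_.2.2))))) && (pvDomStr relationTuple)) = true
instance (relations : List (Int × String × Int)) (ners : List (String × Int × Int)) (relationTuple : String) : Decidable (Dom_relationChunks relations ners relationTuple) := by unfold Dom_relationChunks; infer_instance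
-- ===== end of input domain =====

-- B inverts A's loop nest: one sweep over the ner list fills a dict endpoint -> last
-- containing chunk, and the output is assembled by dict lookups per relation
-- (measured faster in a timing run).

-- ===== PORT A =====
-- A's inner loop keeps the LAST matching ner in left_chunk/right_chunk ("" = none).
-- In the "boundaries"/"type" modes A stores (ner[1],ner[2]) resp. ner[0], values outside
-- the declared return type (those modes are excluded by Pre_); the assignment is rendered
-- as `some ner` there, keeping branch structure (outside Pre_ nothing is claimed).
def relationChunks (relations : List (Int × String × Int)) (ners : List (String × Int × Int)) (relationTuple : String) : List ((String × Int × Int) × String × (String × Int × Int)) :=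
  relations.foldl (fun acc rel =>
    let relation := rel.2.1
    let chunks := ners.foldl
      (fun (lr : Option (String × Int × Int) × Option (String × Int × Int)) ner =>
        let l := if rel.1 ≥ ner.2.1 ∧ rel.1 ≤ ner.2.2 then
                   (if relationTuple = "boundaries_type" then some ner
                    else if relationTuple = "boundaries" then some ner
                    else if relationTuple = "type" then some ner
                    else lr.1)
                 else lr.1
        let r := if rel.2.2 ≥ ner.2.1 ∧ rel.2.2 ≤ ner.2.2 then
                   (if relationTuple = "boundaries_type" then some ner
                    else if relationTuple = "boundaries" then some ner
                    else if relationTuple = "type" then some ner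
                    else lr.2)
                 else lr.2
        (l, r)) (none, none)
    match chunks with
    | (some lc, some rc) => acc ++ [(lc, relation, rc)]
    | _ => acc) []

-- ===== PORT B =====
-- points = set(); for rel in relations: points.add(rel[0]); points.add(rel[2])
def pvPoints (relations : List (Int × String × Int)) : PySem.Set Int :=
  relations.foldl (fun s rel => PySem.Set.add (PySem.Set.add s rel.1) rel.2.2) PySem.Set.empty

-- best = {}; for ner in ners: for p in points: if ner[1] <= p <= ner[2]: best[p] = ner
-- (each key p is only ever overwritten with the current ner, so the resulting MAPPING does
-- not depend on the set's iteration order; the dict is only looked up afterwards)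
def pvBest (points : PySem.Set Int) (ners : List (String × Int × Int)) : PySem.Dict Int (String × Int × Int) :=
  ners.foldl (fun d ner =>
    points.foldl (fun d p => if ner.2.1 ≤ p ∧ p ≤ ner.2.2 then d.insert p ner else d) d)
    PySem.Dict.empty

-- render(ner): in the "boundaries"/"type" modes the Python value lies outside the declared
-- return type (those modes are excluded by Pre_); rendered as the ner itself, keeping the branches.
def pvRender (relationTuple : String) (ner : String × Int × Int) : String × Int × Int :=
  if relationTuple = "boundaries_type" then ner
  else if relationTuple = "boundaries" then ner
  else ner

def relationChunks_alt (relations : List (Int × String × Int)) (ners : List (String × Int × Int)) (relationTuple : String) : List ((String × Int × Int) × String × (String × Int × Int)) :=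
  if relationTuple ≠ "boundaries_type" ∧ relationTuple ≠ "boundaries" ∧ relationTuple ≠ "type" then []
  else
    let best := pvBest (pvPoints relations) ners
    -- "if rel[0] in best and rel[2] in best: out.append((render(best[rel[0]]), rel[1], render(best[rel[2]])))"
    -- (getD's default is never read: the lookup is guarded by the containment test, like Python's best[...])
    relations.foldl (fun out rel =>
      if best.contains rel.1 && best.contains rel.2.2 then
        out ++ [(pvRender relationTuple (best.getD rel.1 ("", 0, 0)), rel.2.1,
                 pvRender relationTuple (best.getD rel.2.2 ("", 0, 0)))]
      else out) []

-- ===== PRECONDITION & SPEC =====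
-- Pre_ excludes relationTuple = "boundaries" and "type": there A (and B in Python) returns
-- pairs of ints resp. bare strings — values NOT of the declared return type
-- List ((String × Int × Int) × String × (String × Int × Int)), hence unportable here.
def Pre_relationChunks (relations : List (Int × String × Int)) (ners : List (String × Int × Int)) (relationTuple : String) : Prop :=
  relationTuple ≠ "boundaries" ∧ relationTuple ≠ "type"
instance (relations : List (Int × String × Int)) (ners : List (String × Int × Int)) (relationTuple : String) : Decidable (Pre_relationChunks relations ners relationTuple) := by unfold Pre_relationChunks; infer_instance

def pvWitness_relationChunks : (List (Int × String × Int)) × (List (String × Int × Int)) × String :=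
  ([(0, "r", 3), (5, "x", 1)], [("T", 0, 2), ("U", 2, 5), ("V", 3, 3)], "boundaries_type")

def Spec_relationChunks (relations : List (Int × String × Int)) (ners : List (String × Int × Int)) (relationTuple : String) (out : List ((String × Int × Int) × String × (String × Int × Int))) : Prop := out = relationChunks_alt relations ners relationTuple
instance (relations : List (Int × String × Int)) (ners : List (String × Int × Int)) (relationTuple : String) (out : List ((String × Int × Int) × String × (String × Int × Int))) : Decidable (Spec_relationChunks relations ners relationTuple out) := by unfold Spec_relationChunks; infer_instance

-- ===== CLAIM (what is proved, stated in full; the proofs are below) =====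
def Claim_equal_relationChunks : Prop := ∀ (relations : List (Int × String × Int)) (ners : List (String × Int × Int)) (relationTuple : String), Dom_relationChunks relations ners relationTuple → Pre_relationChunks relations ners relationTuple → Spec_relationChunks relations ners relationTuple (relationChunks relations ners relationTuple)

-- ===== LEMMAS AND PROOFS =====

-- A's inner fold computes, for each endpoint, the last matching ner,
-- i.e. the first match of the reversed list (mode "boundaries_type").
lemma inner_fold_eq (ners : List (String × Int × Int)) (p q : Int) (l0 r0 : Option (String × Int × Int)) :
    ners.foldl
      (fun (lr : Option (String × Int × Int) × Option (String × Int × Int)) ner =>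
        let l := if p ≥ ner.2.1 ∧ p ≤ ner.2.2 then
                   (if ("boundaries_type" : String) = "boundaries_type" then some ner
                    else if ("boundaries_type" : String) = "boundaries" then some ner
                    else if ("boundaries_type" : String) = "type" then some ner
                    else lr.1)
                 else lr.1
        let r := if q ≥ ner.2.1 ∧ q ≤ ner.2.2 then
                   (if ("boundaries_type" : String) = "boundaries_type" then some ner
                    else if ("boundaries_type" : String) = "boundaries" then some ner
                    else if ("boundaries_type" : String) = "type" then some ner
                    else lr.2)
                 else lr.2
        (l, r)) (l0, r0)
    = ((ners.reverse.find? (fun ner => decide (ner.2.1 ≤ p ∧ p ≤ ner.2.2))).or l0,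
       (ners.reverse.find? (fun ner => decide (ner.2.1 ≤ q ∧ q ≤ ner.2.2))).or r0) := by
  induction ners generalizing l0 r0 with
  | nil => simp
  | cons n t ih =>
    have hstep : (List.foldl
      (fun (lr : Option (String × Int × Int) × Option (String × Int × Int)) ner =>
        let l := if p ≥ ner.2.1 ∧ p ≤ ner.2.2 then
                   (if ("boundaries_type" : String) = "boundaries_type" then some ner
                    else if ("boundaries_type" : String) = "boundaries" then some ner
                    else if ("boundaries_type" : String) = "type" then some ner
                    else lr.1)
                 else lr.1
        let r := if q ≥ ner.2.1 ∧ q ≤ ner.2.2 then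
                   (if ("boundaries_type" : String) = "boundaries_type" then some ner
                    else if ("boundaries_type" : String) = "boundaries" then some ner
                    else if ("boundaries_type" : String) = "type" then some ner
                    else lr.2)
                 else lr.2
        (l, r)) (l0, r0) (n :: t))
      = (List.foldl
      (fun (lr : Option (String × Int × Int) × Option (String × Int × Int)) ner =>
        let l := if p ≥ ner.2.1 ∧ p ≤ ner.2.2 then
                   (if ("boundaries_type" : String) = "boundaries_type" then some ner
                    else if ("boundaries_type" : String) = "boundaries" then some ner
                    else if ("boundaries_type" : String) = "type" then some ner
                    else lr.1)
                 else lr.1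
        let r := if q ≥ ner.2.1 ∧ q ≤ ner.2.2 then
                   (if ("boundaries_type" : String) = "boundaries_type" then some ner
                    else if ("boundaries_type" : String) = "boundaries" then some ner
                    else if ("boundaries_type" : String) = "type" then some ner
                    else lr.2)
                 else lr.2
        (l, r))
        ((if p ≥ n.2.1 ∧ p ≤ n.2.2 then some n else l0),
         (if q ≥ n.2.1 ∧ q ≤ n.2.2 then some n else r0)) t) := rfl
    rw [hstep, ih]
    simp only [List.reverse_cons, List.find?_append, Prod.mk.injEq]
    constructor
    · cases t.reverse.find? (fun ner => decide (ner.2.1 ≤ p ∧ p ≤ ner.2.2)) with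
      | some a => rfl
      | none =>
        by_cases hp : n.2.1 ≤ p ∧ p ≤ n.2.2 <;> simp [List.find?, hp, ge_iff_le]
    · cases t.reverse.find? (fun ner => decide (ner.2.1 ≤ q ∧ q ≤ ner.2.2)) with
      | some a => rfl
      | none =>
        by_cases hq : n.2.1 ≤ q ∧ q ≤ n.2.2 <;> simp [List.find?, hq, ge_iff_le]

-- When relationTuple is none of the three modes A's accumulators never change …
lemma step_id (ners : List (String × Int × Int)) (relationTuple : String)
    (h1 : relationTuple ≠ "boundaries_type") (h2 : relationTuple ≠ "boundaries")
    (h3 : relationTuple ≠ "type") (p q : Int)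
    (lr : Option (String × Int × Int) × Option (String × Int × Int)) :
    ners.foldl
      (fun (lr : Option (String × Int × Int) × Option (String × Int × Int)) ner =>
        let l := if p ≥ ner.2.1 ∧ p ≤ ner.2.2 then
                   (if relationTuple = "boundaries_type" then some ner
                    else if relationTuple = "boundaries" then some ner
                    else if relationTuple = "type" then some ner
                    else lr.1)
                 else lr.1
        let r := if q ≥ ner.2.1 ∧ q ≤ ner.2.2 then
                   (if relationTuple = "boundaries_type" then some ner
                    else if relationTuple = "boundaries" then some ner
                    else if relationTuple = "type" then some ner
                    else lr.2)
                 else lr.2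
        (l, r)) lr = lr := by
  induction ners generalizing lr with
  | nil => rfl
  | cons n t ih => rw [List.foldl_cons, ih]; simp [h1, h2, h3]

-- … so A returns [].
lemma a_other_mode (relations : List (Int × String × Int)) (ners : List (String × Int × Int))
    (relationTuple : String) (h1 : relationTuple ≠ "boundaries_type")
    (h2 : relationTuple ≠ "boundaries") (h3 : relationTuple ≠ "type") :
    relationChunks relations ners relationTuple = [] := by
  unfold relationChunks
  induction relations with
  | nil => rfl
  | cons rel rels ih =>
    simp only [List.foldl_cons]
    rw [step_id ners relationTuple h1 h2 h3 rel.1 rel.2.2 (none, none)]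
    exact ih

-- Adding more relations never removes a point from the set.
lemma points_mono (relations : List (Int × String × Int)) (s : PySem.Set Int) (x : Int)
    (hx : x ∈ s) :
    x ∈ relations.foldl (fun s rel => PySem.Set.add (PySem.Set.add s rel.1) rel.2.2) s := by
  induction relations generalizing s with
  | nil => exact hx
  | cons r t ih =>
    exact ih _ ((PySem.Set.mem_add _ _ _).2 (Or.inl ((PySem.Set.mem_add _ _ _).2 (Or.inl hx))))

-- Every endpoint of a listed relation is in the point set.
lemma mem_points_aux (relations : List (Int × String × Int)) (rel : Int × String × Int)
    (s : PySem.Set Int) (h : rel ∈ relations) :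
    rel.1 ∈ relations.foldl (fun s rel => PySem.Set.add (PySem.Set.add s rel.1) rel.2.2) s ∧
    rel.2.2 ∈ relations.foldl (fun s rel => PySem.Set.add (PySem.Set.add s rel.1) rel.2.2) s := by
  induction relations generalizing s with
  | nil => cases h
  | cons r t ih =>
    rcases List.mem_cons.1 h with h | h
    · subst h
      simp only [List.foldl_cons]
      exact ⟨points_mono t _ _ ((PySem.Set.mem_add _ _ _).2
               (Or.inl ((PySem.Set.mem_add _ _ _).2 (Or.inr rfl)))),
             points_mono t _ _ ((PySem.Set.mem_add _ _ _).2 (Or.inr rfl))⟩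
    · exact ih _ h

lemma mem_points (relations : List (Int × String × Int)) (rel : Int × String × Int)
    (h : rel ∈ relations) : rel.1 ∈ pvPoints relations ∧ rel.2.2 ∈ pvPoints relations :=
  mem_points_aux relations rel PySem.Set.empty h

-- One ner's inner loop over the point set: the dict entry at p becomes that ner exactly
-- when p is in the set and contained in the ner; other entries are untouched.
lemma inner_points_get? (n : String × Int × Int) (points : List Int)
    (d : PySem.Dict Int (String × Int × Int)) (p : Int) :
    (points.foldl (fun d q => if n.2.1 ≤ q ∧ q ≤ n.2.2 then d.insert q n else d) d).get? p
      = if p ∈ points ∧ (n.2.1 ≤ p ∧ p ≤ n.2.2) then some n else d.get? p := by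
  induction points generalizing d with
  | nil => simp
  | cons q t ih =>
    rw [List.foldl_cons, ih]
    have hstep : ∀ (d : PySem.Dict Int (String × Int × Int)),
        (if n.2.1 ≤ q ∧ q ≤ n.2.2 then d.insert q n else d).get? p
          = if p = q ∧ (n.2.1 ≤ p ∧ p ≤ n.2.2) then some n else d.get? p := by
      intro d
      by_cases hpq : p = q
      · subst hpq
        by_cases hc : n.2.1 ≤ p ∧ p ≤ n.2.2 <;> simp [hc, PySem.Dict.get?_insert_self]
      · by_cases hc : n.2.1 ≤ q ∧ q ≤ n.2.2 <;>
          simp [hc, hpq, PySem.Dict.get?_insert_of_ne _ _ hpq]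
    rw [hstep]
    by_cases hpq : p = q
    · subst hpq
      by_cases hpt : p ∈ t <;> by_cases hc : n.2.1 ≤ p ∧ p ≤ n.2.2 <;> simp [hpt, hc]
    · by_cases hpt : p ∈ t <;> by_cases hc : n.2.1 ≤ p ∧ p ≤ n.2.2 <;> simp [hpt, hpq, hc]

-- The full sweep: best.get? p is the last containing ner for p in the point set, none outside.
lemma best_get? (points : List Int) (ners : List (String × Int × Int))
    (d : PySem.Dict Int (String × Int × Int)) (p : Int) :
    (ners.foldl (fun d ner =>
        points.foldl (fun d q => if ner.2.1 ≤ q ∧ q ≤ ner.2.2 then d.insert q ner else d) d) d).get? p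
      = if p ∈ points
          then ((ners.reverse.find? (fun ner => decide (ner.2.1 ≤ p ∧ p ≤ ner.2.2))).or (d.get? p))
          else d.get? p := by
  induction ners generalizing d with
  | nil => by_cases hp : p ∈ points <;> simp [hp]
  | cons n t ih =>
    rw [List.foldl_cons, ih]
    by_cases hp : p ∈ points
    · simp only [hp, if_true, List.reverse_cons, List.find?_append]
      rw [inner_points_get? n points d p]
      cases hfind : t.reverse.find? (fun ner => decide (ner.2.1 ≤ p ∧ p ≤ ner.2.2)) with
      | some a => rfl
      | none =>
        by_cases hc : n.2.1 ≤ p ∧ p ≤ n.2.2 <;> simp [List.find?, hp, hc]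
    · simp only [hp, if_false]
      rw [inner_points_get? n points d p]
      simp [hp]

-- ===== VERDICT (by name: the statement is the Claim_ definition above) =====
theorem relationChunks_spec : Claim_equal_relationChunks := by
  intro relations ners relationTuple _ hpre
  obtain ⟨h2, h3⟩ := hpre
  unfold Spec_relationChunks
  by_cases hbt : relationTuple = "boundaries_type"
  · subst hbt
    unfold relationChunks relationChunks_alt
    rw [if_neg (by simp)]
    have hrw : ∀ (acc : List ((String × Int × Int) × String × (String × Int × Int)))
        (rel : Int × String × Int), rel ∈ relations →
        (match
          ners.foldl
            (fun (lr : Option (String × Int × Int) × Option (String × Int × Int)) ner =>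
              let l := if rel.1 ≥ ner.2.1 ∧ rel.1 ≤ ner.2.2 then
                         (if ("boundaries_type" : String) = "boundaries_type" then some ner
                          else if ("boundaries_type" : String) = "boundaries" then some ner
                          else if ("boundaries_type" : String) = "type" then some ner
                          else lr.1)
                       else lr.1
              let r := if rel.2.2 ≥ ner.2.1 ∧ rel.2.2 ≤ ner.2.2 then
                         (if ("boundaries_type" : String) = "boundaries_type" then some ner
                          else if ("boundaries_type" : String) = "boundaries" then some ner
                          else if ("boundaries_type" : String) = "type" then some ner
                          else lr.2)
                       else lr.2
              (l, r)) (none, none)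
          with
          | (some lc, some rc) => acc ++ [(lc, rel.2.1, rc)]
          | _ => acc)
        = (if (pvBest (pvPoints relations) ners).contains rel.1 &&
              (pvBest (pvPoints relations) ners).contains rel.2.2 then
             acc ++ [(pvRender "boundaries_type"
                        ((pvBest (pvPoints relations) ners).getD rel.1 ("", 0, 0)), rel.2.1,
                      pvRender "boundaries_type"
                        ((pvBest (pvPoints relations) ners).getD rel.2.2 ("", 0, 0)))]
           else acc) := by
      intro acc rel hrel
      rw [inner_fold_eq ners rel.1 rel.2.2 none none]
      obtain ⟨hl, hr⟩ := mem_points relations rel hrel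
      rw [PySem.Dict.contains_eq_isSome_get?, PySem.Dict.contains_eq_isSome_get?,
          PySem.Dict.getD_eq_get?_getD, PySem.Dict.getD_eq_get?_getD]
      unfold pvBest
      rw [best_get? (pvPoints relations) ners PySem.Dict.empty rel.1,
          best_get? (pvPoints relations) ners PySem.Dict.empty rel.2.2]
      simp only [hl, hr, if_true, PySem.Dict.get?_empty]
      cases ners.reverse.find? (fun ner => decide (ner.2.1 ≤ rel.1 ∧ rel.1 ≤ ner.2.2)) <;>
        cases ners.reverse.find? (fun ner => decide (ner.2.1 ≤ rel.2.2 ∧ rel.2.2 ≤ ner.2.2)) <;>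
          simp [Option.or, pvRender]
    exact PySem.List.foldl_congr_mem relations _ _ [] hrw
  · rw [a_other_mode _ _ _ hbt h2 h3]
    unfold relationChunks_alt
    simp [hbt, h2, h3]
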